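-- pv_equiv track=rewrite | github.com/FEniCS/dolfinx | cmake/scripts/dummy_docstrings.py | group_overloaded_functions
-- ===== SOURCE A (Python) =====
-- def get_function_name(signature):
--     "Extract function name from signature."
--     words = signature.split("(")[0].split()
--     # Special handling of operator since Swig needs 'operator double', not just
--     # 'double', which is different from _normal_ operators like 'operator='
--     if len(words) > 1 and words[-2] == "operator":
--         return " ".join(words[-2:])
--     return words[-1]
--
-- def group_overloaded_functions(docs):
--     """Group functions with same name, but different signature.
--     Assuming that overloaded functions in the dolfin namespace are defined
--     in the same header file."""
--
--     new_docs = []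
--     for (classname, parent, comment, function_documentation) in docs:
--         func_doc = {}
--         order = []
--         # Iterate over class functions
--         for (signature, comm) in function_documentation:
--             # No need to put empty docstrings in the docstrings.i file!
--             if comm is None:
--                 continue
--             name = get_function_name(signature)
--             if not name in order:
--                 order.append(name)
--             if not name in func_doc:
--                 func_doc[name] = [(signature, comm)]
--             else:
--                 func_doc[name].append((signature, comm))
--         new_docs.append((classname, parent, comment, func_doc, order))
--
--     return new_docs
-- ===== SOURCE B (Python) =====
-- def get_function_name(signature):
--     "Extract function name from signature."
--     head = signature.split("(")[0].split()
--     if head[-2:-1] == ["operator"]: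
--         return " ".join(["operator", head[-1]])
--     return head[-1]
--
-- def group_overloaded_functions(docs):
--     """Group functions with same name, but different signature.
--     Staged: tag each documented function with its name, dedupe the tags for
--     the order, then gather each group by filtering on the tag."""
--     def row(classname, parent, comment, function_documentation):
--         entries = [(get_function_name(sig), sig, comm)
--                    for sig, comm in function_documentation if comm is not None]
--         order = list(dict.fromkeys(name for name, _, _ in entries))
--         func_doc = {name: [(sig, comm) for n, sig, comm in entries if n == name]
--                     for name in order}
--         return (classname, parent, comment, func_doc, order)
--     return [row(*doc) for doc in docs]
-- ===== Notes on version B (the rewrite author's own statement) =====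
-- stated objective: alternative
-- what changed: B replaces A's single-pass state machine (dict plus a separately maintained membership-guarded order list, with a two-branch dict update) by staged comprehensions: tag each documented function with its name, dedupe the tag list once (dict.fromkeys) to get the order, then build each group by filtering the tagged list per name.
import Mathlib
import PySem

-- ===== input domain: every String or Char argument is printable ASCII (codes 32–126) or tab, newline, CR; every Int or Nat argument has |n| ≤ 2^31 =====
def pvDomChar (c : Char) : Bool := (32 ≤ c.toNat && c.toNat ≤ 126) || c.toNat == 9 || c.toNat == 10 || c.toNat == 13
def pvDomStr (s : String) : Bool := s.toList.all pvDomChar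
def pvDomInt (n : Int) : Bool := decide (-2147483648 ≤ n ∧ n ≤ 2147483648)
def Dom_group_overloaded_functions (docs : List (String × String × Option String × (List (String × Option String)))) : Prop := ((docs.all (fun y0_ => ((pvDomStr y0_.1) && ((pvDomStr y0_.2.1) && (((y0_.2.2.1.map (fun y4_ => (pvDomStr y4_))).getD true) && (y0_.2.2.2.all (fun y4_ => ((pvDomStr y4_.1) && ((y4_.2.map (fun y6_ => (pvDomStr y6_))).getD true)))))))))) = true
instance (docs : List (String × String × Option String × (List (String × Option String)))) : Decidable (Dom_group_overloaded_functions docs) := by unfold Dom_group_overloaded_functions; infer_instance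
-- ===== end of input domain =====

-- B replaces A's single-pass dict+order-list state machine by staged comprehensions
-- (tag with the name, dedupe the tags for the order, gather each group by filtering);
-- objective: alternative (same asymptotic cost).

-- ===== PORT A =====
-- words[-1] raises IndexError in Python when the word list is empty; that input is
-- excluded by Pre_ below, the port returns "" there (nothing is claimed outside Pre_).
def pvGetFunctionNameA (signature : String) : String :=
  let words := PySem.Str.split₀ (PySem.List.pyGetD ((PySem.Str.split? signature "(").getD []) 0 "")
  if 1 < words.length ∧ PySem.List.pyGetD words (-2) "" = "operator" then
    PySem.Str.join " " (PySem.List.slice words (some (-2)) none)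
  else
    PySem.List.pyGetD words (-1) ""

def pvStepA (st : PySem.Dict String (List (String × String)) × List String)
    (p : String × Option String) : PySem.Dict String (List (String × String)) × List String :=
  match p.2 with
  | none => st
  | some c =>
    let name := pvGetFunctionNameA p.1
    let ord := if name ∈ st.2 then st.2 else st.2 ++ [name]
    let d := if st.1.contains name then st.1.modify name [] (· ++ [(p.1, c)])
             else st.1.insert name [(p.1, c)]
    (d, ord)

def group_overloaded_functions (docs : List (String × String × Option String × (List (String × Option String)))) : List (String × String × Option String × (List (String × List (String × String))) × List String) :=
  docs.foldl (fun acc e =>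
    let st := e.2.2.2.foldl pvStepA (PySem.Dict.empty, [])
    acc ++ [(e.1, e.2.1, e.2.2.1, st.1.items, st.2)]) []

-- ===== PORT B =====
def pvGetFunctionNameB (signature : String) : String :=
  let head := PySem.Str.split₀ (PySem.List.pyGetD ((PySem.Str.split? signature "(").getD []) 0 "")
  if PySem.List.slice head (some (-2)) (some (-1)) = ["operator"] then
    PySem.Str.join " " ["operator", PySem.List.pyGetD head (-1) ""]
  else
    PySem.List.pyGetD head (-1) ""

-- the tagging comprehension: [(get_function_name(sig), sig, comm) for … if comm is not None]
def pvEntries (function_documentation : List (String × Option String)) : List (String × String × String) :=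
  function_documentation.filterMap (fun p => p.2.map (fun c => (pvGetFunctionNameB p.1, p.1, c)))

-- list(dict.fromkeys(…)) is PySem.List.dedup; the dict comprehension iterates the Nodup
-- key list `order`, so its insertion-ordered items list is exactly this map (exact).
def group_overloaded_functions_alt (docs : List (String × String × Option String × (List (String × Option String)))) : List (String × String × Option String × (List (String × List (String × String))) × List String) :=
  docs.map (fun e =>
    let entries := pvEntries e.2.2.2
    let order := PySem.List.dedup (entries.map (·.1))
    let func_doc := order.map (fun name =>
      (name, (entries.filter (fun t => t.1 == name)).map (fun t => (t.2.1, t.2.2))))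
    (e.1, e.2.1, e.2.2.1, func_doc, order))

-- ===== PRECONDITION & SPEC =====
-- Pre_ excludes exactly the inputs on which Python A raises IndexError: a documented
-- function whose signature has no word before its first '(' (words[-1] on an empty list).
def Pre_group_overloaded_functions (docs : List (String × String × Option String × (List (String × Option String)))) : Prop :=
  ∀ e ∈ docs, ∀ p ∈ e.2.2.2, p.2 ≠ none →
    PySem.Str.split₀ (((PySem.Str.split? p.1 "(").getD []).headD "") ≠ []
instance (docs : List (String × String × Option String × (List (String × Option String)))) : Decidable (Pre_group_overloaded_functions docs) := by unfold Pre_group_overloaded_functions; infer_instance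

def pvWitness_group_overloaded_functions : (List (String × String × Option String × (List (String × Option String)))) :=
  [("Mesh", "Base", some "class doc",
    [("foo(int)", some "d1"), ("foo(double)", some "d2"), ("bar()", none), ("operator double ()", some "d3")])]

def Spec_group_overloaded_functions (docs : List (String × String × Option String × (List (String × Option String)))) (out : List (String × String × Option String × (List (String × List (String × String))) × List String)) : Prop := out = group_overloaded_functions_alt docs
instance (docs : List (String × String × Option String × (List (String × Option String)))) (out : List (String × String × Option String × (List (String × List (String × String))) × List String)) : Decidable (Spec_group_overloaded_functions docs out) := by
  unfold Spec_group_overloaded_functions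
  haveI : DecidableEq (List (String × List (String × String)) × List String) := instDecidableEqProd
  haveI : DecidableEq (Option String × List (String × List (String × String)) × List String) := instDecidableEqProd
  haveI : DecidableEq (String × Option String × List (String × List (String × String)) × List String) := instDecidableEqProd
  haveI : DecidableEq (String × String × Option String × List (String × List (String × String)) × List String) := instDecidableEqProd
  exact instDecidableEqList _ _

-- ===== CLAIM (what is proved, stated in full; the proofs are below) =====
def Claim_equal_group_overloaded_functions : Prop := ∀ (docs : List (String × String × Option String × (List (String × Option String)))), Dom_group_overloaded_functions docs → Pre_group_overloaded_functions docs → Spec_group_overloaded_functions docs (group_overloaded_functions docs)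

-- ===== LEMMAS AND PROOFS =====

theorem pvNameBranch (words : List String) :
    (if PySem.List.slice words (some (-2)) (some (-1)) = ["operator"] then
      PySem.Str.join " " ["operator", PySem.List.pyGetD words (-1) ""]
    else PySem.List.pyGetD words (-1) "")
    = (if 1 < words.length ∧ PySem.List.pyGetD words (-2) "" = "operator" then
      PySem.Str.join " " (PySem.List.slice words (some (-2)) none)
    else PySem.List.pyGetD words (-1) "") := by
  cases words using List.reverseRecOn with
  | nil => simp [PySem.List.slice]
  | append_singleton zs b _ =>
    cases zs using List.reverseRecOn with
    | nil => simp [PySem.List.slice]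
    | append_singleton ys a _ =>
      rw [show (ys ++ [a]) ++ [b] = ys ++ [a, b] by simp]
      have hsl : PySem.List.slice (ys ++ [a, b]) (some (-2)) (some (-1)) = [a] := by
        simp [PySem.List.slice]
      have hfrom : PySem.List.slice (ys ++ [a, b]) (some (-2)) none = [a, b] := by
        rw [PySem.List.slice_from_neg_ofNat _ 2 (by omega)]
        simp
      have hg1 : PySem.List.pyGetD (ys ++ [a, b]) (-1) "" = b := by
        rw [show ys ++ [a, b] = (ys ++ [a]) ++ [b] by simp,
            PySem.List.pyGetD_neg_one_append_singleton]
      have hg2 : PySem.List.pyGetD (ys ++ [a, b]) (-2) "" = a := by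
        rw [PySem.List.pyGetD_neg_ofNat _ 2 _ (by omega) (by simp)]
        simp
      rw [hsl, hfrom, hg1, hg2]
      by_cases ha : a = "operator" <;> simp [ha]

theorem pvGetFunctionName_eq (s : String) : pvGetFunctionNameB s = pvGetFunctionNameA s := by
  unfold pvGetFunctionNameA pvGetFunctionNameB
  exact pvNameBranch _

-- proof-side helper: A's inner loop with the order list projected away
def pvStepM (d : PySem.Dict String (List (String × String)))
    (p : String × Option String) : PySem.Dict String (List (String × String)) :=
  match p.2 with
  | none => d
  | some c => d.modify (pvGetFunctionNameA p.1) [] (· ++ [(p.1, c)])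

theorem pvInner_eq (l : List (String × Option String))
    (d : PySem.Dict String (List (String × String))) (ord : List String)
    (hord : ord = d.keys) (hnd : d.keys.Nodup) :
    l.foldl pvStepA (d, ord) = (l.foldl pvStepM d, (l.foldl pvStepM d).keys) := by
  induction l generalizing d ord with
  | nil => simp [hord]
  | cons p t ih =>
    cases hc : p.2 with
    | none =>
      have hA : pvStepA (d, ord) p = (d, ord) := by simp [pvStepA, hc]
      have hB : pvStepM d p = d := by simp [pvStepM, hc]
      rw [List.foldl_cons, List.foldl_cons, hA, hB]
      exact ih d ord hord hnd
    | some c =>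
      rw [List.foldl_cons, List.foldl_cons]
      have hB : pvStepM d p = d.modify (pvGetFunctionNameA p.1) [] (· ++ [(p.1, c)]) := by
        simp [pvStepM, hc]
      by_cases hcon : d.contains (pvGetFunctionNameA p.1)
      · have hmem : pvGetFunctionNameA p.1 ∈ ord := by
          rw [hord]; exact (PySem.Dict.contains_iff_mem_keys d _).mp hcon
        have hA : pvStepA (d, ord) p
            = (d.modify (pvGetFunctionNameA p.1) [] (· ++ [(p.1, c)]), ord) := by
          simp [pvStepA, hc, hmem, hcon]
        have hkeys : (d.modify (pvGetFunctionNameA p.1) [] (· ++ [(p.1, c)])).keys = d.keys := by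
          rw [PySem.Dict.keys_modify, PySem.Dict.keys_insert_of_contains _ _ hcon]
        rw [hA, hB]
        exact ih _ ord (by rw [hord, hkeys]) (by rw [hkeys]; exact hnd)
      · have hmem : pvGetFunctionNameA p.1 ∉ ord := by
          rw [hord]; exact fun h => hcon ((PySem.Dict.contains_iff_mem_keys d _).mpr h)
        have hA : pvStepA (d, ord) p
            = (d.insert (pvGetFunctionNameA p.1) [(p.1, c)], ord ++ [pvGetFunctionNameA p.1]) := by
          simp [pvStepA, hc, hmem, hcon]
        have hBmod : d.modify (pvGetFunctionNameA p.1) [] (· ++ [(p.1, c)])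
            = d.insert (pvGetFunctionNameA p.1) [(p.1, c)] := by
          rw [PySem.Dict.modify, PySem.Dict.getD_of_not_contains _ _ (by simpa using hcon)]
          simp
        have hkeys : (d.insert (pvGetFunctionNameA p.1) [(p.1, c)]).keys
            = d.keys ++ [pvGetFunctionNameA p.1] :=
          PySem.Dict.keys_insert_of_not_contains _ _ (by simpa using hcon)
        have hnotin : pvGetFunctionNameA p.1 ∉ d.keys :=
          fun h => hcon ((PySem.Dict.contains_iff_mem_keys d _).mpr h)
        rw [hA, hB, hBmod]
        exact ih _ _ (by rw [hord, hkeys]) (by rw [hkeys]; simp [List.nodup_append, hnd]; exact fun a ha he => hnotin (he ▸ ha))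

-- A's dict loop is the modify-loop over B's tagged entries list
theorem pvFoldM_eq_entries (l : List (String × Option String))
    (d : PySem.Dict String (List (String × String))) :
    l.foldl pvStepM d
      = (pvEntries l).foldl (fun d t => d.modify t.1 [] (· ++ [t.2])) d := by
  induction l generalizing d with
  | nil => rfl
  | cons p t ih =>
    cases hc : p.2 with
    | none => simp [pvStepM, hc, pvEntries, ih]
    | some c =>
      simp only [pvEntries, List.filterMap_cons, hc, Option.map_some, List.foldl_cons]
      rw [show pvStepM d p = d.modify (pvGetFunctionNameB p.1) [] (· ++ [(p.1, c)]) by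
            simp [pvStepM, hc, pvGetFunctionName_eq]]
      exact ih _

theorem pvKeysM (l : List (String × Option String)) :
    (l.foldl pvStepM PySem.Dict.empty).keys = PySem.List.dedup ((pvEntries l).map (·.1)) := by
  rw [pvFoldM_eq_entries,
      PySem.Dict.keys_foldl_modify_key (pvEntries l) (fun t : String × String × String => t.1) [] (fun _ t x => x ++ [t.2]) PySem.Dict.empty]
  simp [PySem.Dict.keys_empty, PySem.Set.update_nil_left]

theorem pvItemsM (l : List (String × Option String)) :
    (l.foldl pvStepM PySem.Dict.empty).items
      = (PySem.List.dedup ((pvEntries l).map (·.1))).map (fun name =>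
          (name, ((pvEntries l).filter (fun t => t.1 == name)).map (fun t => (t.2.1, t.2.2)))) := by
  have hnd : (l.foldl pvStepM PySem.Dict.empty).keys.Nodup := by
    rw [pvFoldM_eq_entries]
    exact PySem.Dict.nodup_keys_foldl_modify_key (pvEntries l) (fun t : String × String × String => t.1) [] (fun _ t x => x ++ [t.2]) PySem.Dict.empty
      (by simp [PySem.Dict.keys_empty])
  rw [PySem.Dict.items_eq_map_keys _ hnd [], pvKeysM]
  refine List.map_congr_left (fun name _ => ?_)
  rw [pvFoldM_eq_entries, PySem.Dict.getD_foldl_modify_append (pvEntries l) PySem.Dict.empty name]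
  simp [PySem.Dict.getD_empty]

-- ===== VERDICT (by name: the statement is the Claim_ definition above) =====
theorem group_overloaded_functions_spec : Claim_equal_group_overloaded_functions := by
  intro docs _ _
  unfold Spec_group_overloaded_functions group_overloaded_functions group_overloaded_functions_alt
  rw [PySem.List.foldl_append_singleton_eq_map]
  refine List.map_congr_left ?_
  intro e _
  rw [pvInner_eq _ PySem.Dict.empty [] (by simp [PySem.Dict.keys_empty]) (by simp [PySem.Dict.keys_empty]),
      pvKeysM, pvItemsM]
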